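-- pv_equiv track=rewrite | github.com/JMRLudan/LCVB_generation_evaluation | pipeline/eval_pipeline.py | enumerate_permutations
-- ===== SOURCE A (Python) =====
-- from typing import List, Dict, Optional, Tuple
--
-- def parse_all_seeds(scenario: Dict) -> Dict[str, List[str]]:
--     """Parse all seeds from a scenario into {set_name: [seed1, seed2, seed3]}."""
--     result = {}
--     for key, name in [("evidence_set_c_seeds", "c"), ("evidence_set_a_seeds", "a"), ("evidence_set_b_seeds", "b")]:
--         raw = scenario.get(key, "")
--         seeds = [s.strip() for s in raw.split("||") if s.strip()]
--         result[name] = seeds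
--     return result
--
-- def enumerate_permutations(scenario: Dict, variant: str) -> List[Tuple[str, Dict[str, int]]]:
--     """Enumerate all seed-index permutations for a variant.
--     Returns list of (perm_label, seed_indices) tuples.
--
--     Each evidence set has up to 3 seeds. We enumerate the cartesian product
--     of seed indices across the relevant sets for the variant.
--
--     e.g. A+C with 3 C seeds and 3 A seeds → 9 permutations:
--       ("c0_a0", {"c":0, "a":0}), ("c0_a1", {"c":0, "a":1}), ...
--     """
--     all_seeds = parse_all_seeds(scenario)
--
--     # Determine which sets are relevant and their ranges
--     sets = []  # list of (name, count)
--     if "C" in variant: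
--         sets.append(("c", len(all_seeds["c"])))
--     if variant.startswith("A") or variant == "A":
--         sets.append(("a", len(all_seeds["a"])))
--     if "B" in variant and variant != "A+C":
--         sets.append(("b", len(all_seeds["b"])))
--
--     if not sets:
--         return [("none", {})]
--
--     # Cartesian product of indices
--     from itertools import product as iterproduct
--     ranges = [range(count) for _, count in sets]
--     perms = []
--     for combo in iterproduct(*ranges):
--         indices = {name: idx for (name, _), idx in zip(sets, combo)}
--         label = "_".join(f"{name}{idx}" for (name, _), idx in zip(sets, combo))
--         perms.append((label, indices))
--
--     return perms
-- ===== SOURCE B (Python) =====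
-- def parse_all_seeds(scenario):
--     """Parse all seeds from a scenario into {set_name: [seed1, seed2, seed3]}."""
--     result = {}
--     for key, name in [("evidence_set_c_seeds", "c"), ("evidence_set_a_seeds", "a"), ("evidence_set_b_seeds", "b")]:
--         raw = scenario.get(key, "")
--         seeds = [s.strip() for s in raw.split("||") if s.strip()]
--         result[name] = seeds
--     return result
--
-- def _selected_sets(scenario, variant):
--     """The set-selection rules, unchanged from the original."""
--     all_seeds = parse_all_seeds(scenario)
--     sets = []
--     if "C" in variant:
--         sets.append(("c", len(all_seeds["c"])))
--     if variant.startswith("A") or variant == "A":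
--         sets.append(("a", len(all_seeds["a"])))
--     if "B" in variant and variant != "A+C":
--         sets.append(("b", len(all_seeds["b"])))
--     return sets
--
-- def enumerate_permutations(scenario, variant):
--     sets = _selected_sets(scenario, variant)
--     if not sets:
--         return [("none", {})]
--     # incremental cross-product: grow a frontier of partial (pieces, indices) pairs
--     frontier = [([], {})]
--     for name, count in sets:
--         frontier = [(pieces + [f"{name}{i}"], {**idxs, name: i})
--                     for pieces, idxs in frontier
--                     for i in range(count)]
--     return [("_".join(pieces), idxs) for pieces, idxs in frontier]
-- ===== Notes on version B (the rewrite author's own statement) =====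
-- stated objective: alternative
-- what changed: Replaces the itertools.product call (build all index tuples, then zip each against the sets to render label and dict) with an incrementally grown frontier of partial (label-pieces, indices) results, extended set by set; the set-selection rules and the empty-sets guard are unchanged.
import Mathlib
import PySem

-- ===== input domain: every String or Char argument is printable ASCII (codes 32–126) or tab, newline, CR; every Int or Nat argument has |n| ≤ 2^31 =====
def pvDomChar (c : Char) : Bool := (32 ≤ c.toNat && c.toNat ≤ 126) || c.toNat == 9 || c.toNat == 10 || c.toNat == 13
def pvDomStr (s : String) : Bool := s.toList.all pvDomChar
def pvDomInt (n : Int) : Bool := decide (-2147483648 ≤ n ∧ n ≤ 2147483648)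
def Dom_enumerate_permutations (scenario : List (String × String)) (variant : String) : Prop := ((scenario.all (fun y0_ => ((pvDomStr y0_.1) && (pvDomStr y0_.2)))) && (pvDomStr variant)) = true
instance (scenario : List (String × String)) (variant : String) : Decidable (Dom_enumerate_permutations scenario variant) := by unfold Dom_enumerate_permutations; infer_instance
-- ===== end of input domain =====

-- B replaces itertools.product with an incrementally grown frontier of partial (pieces, indices)
-- results (objective: alternative decomposition, same cost); the set-selection rules are unchanged.

-- ===== PORT A =====

-- helper parse_all_seeds (shared module helper; used verbatim by both Pythons)
def parse_all_seeds (scenario : List (String × String)) : PySem.Dict String (List String) :=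
  [("evidence_set_c_seeds", "c"), ("evidence_set_a_seeds", "a"), ("evidence_set_b_seeds", "b")].foldl
    (fun result kn =>
      let raw := (PySem.Dict.ofList scenario).getD kn.1 ""
      -- split? returns some for the nonempty separator "||"
      let seeds := (((PySem.Str.split? raw "||").getD []).map PySem.Str.strip).filter (fun s => s ≠ "")
      result.insert kn.2 seeds)
    PySem.Dict.empty

-- itertools.product(*[range(c) for c in counts]), each tuple as a list (first factor slowest)
def pyProduct : List Int → List (List Int)
  | [] => [[]]
  | c :: cs => (PySem.List.pyRange 0 c 1).flatMap (fun i => (pyProduct cs).map (fun rest => i :: rest))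

def enumerate_permutations (scenario : List (String × String)) (variant : String) :
    List (String × (List (String × Int))) :=
  let all_seeds := parse_all_seeds scenario
  let sets : List (String × Int) :=
    (if PySem.Str.isIn "C" variant then [("c", ((all_seeds.getD "c" []).length : Int))] else []) ++
    (if PySem.Str.startswith variant "A" || variant == "A" then [("a", ((all_seeds.getD "a" []).length : Int))] else []) ++
    (if PySem.Str.isIn "B" variant && !(variant == "A+C") then [("b", ((all_seeds.getD "b" []).length : Int))] else [])
  if sets = [] then [("none", [])]
  else
    (pyProduct (sets.map Prod.snd)).map (fun combo =>
      let zipped := sets.zip combo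
      -- dict comprehension {name: idx for ...}: fold of inserts, then its items
      let indices := (zipped.foldl (fun d p => d.insert p.1.1 p.2) PySem.Dict.empty).items
      let label := PySem.Str.join "_" (zipped.map (fun p => p.1.1 ++ PySem.Int.toStr p.2))
      (label, indices))

-- ===== PORT B =====

-- _selected_sets: the unchanged set-selection rules, factored out as in Source B
def selectedSets (scenario : List (String × String)) (variant : String) : List (String × Int) :=
  let all_seeds := parse_all_seeds scenario
  (if PySem.Str.isIn "C" variant then [("c", ((all_seeds.getD "c" []).length : Int))] else []) ++
  (if PySem.Str.startswith variant "A" || variant == "A" then [("a", ((all_seeds.getD "a" []).length : Int))] else []) ++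
  (if PySem.Str.isIn "B" variant && !(variant == "A+C") then [("b", ((all_seeds.getD "b" []).length : Int))] else [])

-- one frontier-growing step; {**idxs, name: i} appends since name is fresh in every partial dict
def frontierStep (fr : List (List String × List (String × Int))) (p : String × Int) :
    List (List String × List (String × Int)) :=
  fr.flatMap (fun pr =>
    (PySem.List.pyRange 0 p.2 1).map (fun i =>
      (pr.1 ++ [p.1 ++ PySem.Int.toStr i], pr.2 ++ [(p.1, i)])))

def enumerate_permutations_alt (scenario : List (String × String)) (variant : String) :
    List (String × (List (String × Int))) :=
  let sets := selectedSets scenario variant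
  if sets = [] then [("none", [])]
  else
    (sets.foldl frontierStep [([], [])]).map (fun pr => (PySem.Str.join "_" pr.1, pr.2))

-- ===== PRECONDITION & SPEC =====
def Spec_enumerate_permutations (scenario : List (String × String)) (variant : String) (out : List (String × (List (String × Int)))) : Prop := out = enumerate_permutations_alt scenario variant
instance (scenario : List (String × String)) (variant : String) (out : List (String × (List (String × Int)))) : Decidable (Spec_enumerate_permutations scenario variant out) := by unfold Spec_enumerate_permutations; infer_instance

-- ===== CLAIM (what is proved, stated in full; the proofs are below) =====
def Claim_equal_enumerate_permutations : Prop := ∀ (scenario : List (String × String)) (variant : String), Dom_enumerate_permutations scenario variant → Spec_enumerate_permutations scenario variant (enumerate_permutations scenario variant)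

-- ===== LEMMAS AND PROOFS =====

-- every tuple of the product has one index per factor
theorem length_of_mem_pyProduct {cs : List Int} {combo : List Int}
    (h : combo ∈ pyProduct cs) : combo.length = cs.length := by
  induction cs generalizing combo with
  | nil => simp [pyProduct] at h; simp [h]
  | cons c cs ih =>
    simp only [pyProduct, List.mem_flatMap, List.mem_map] at h
    obtain ⟨i, _, rest, hrest, rfl⟩ := h
    simp [ih hrest]

-- the frontier fold is the product, each tuple rendered behind the partial it extends
theorem foldl_frontierStep (sets : List (String × Int))
    (fr : List (List String × List (String × Int))) :
    sets.foldl frontierStep fr =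
      fr.flatMap (fun pr =>
        (pyProduct (sets.map Prod.snd)).map (fun combo =>
          (pr.1 ++ (sets.zip combo).map (fun p => p.1.1 ++ PySem.Int.toStr p.2),
           pr.2 ++ (sets.zip combo).map (fun p => (p.1.1, p.2))))) := by
  induction sets generalizing fr with
  | nil =>
    simp [pyProduct]
  | cons s rest ih =>
    simp only [List.foldl_cons, ih, pyProduct, frontierStep, List.map_cons,
      List.flatMap_assoc, List.map_flatMap, List.flatMap_map, List.map_map]
    apply List.flatMap_congr
    intro pr _
    apply List.flatMap_congr
    intro i _
    apply List.map_congr_left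
    intro combo _
    simp [List.append_assoc]

-- names of the selected sets are distinct
theorem nodup_selectedSets (scenario : List (String × String)) (variant : String) :
    ((selectedSets scenario variant).map Prod.fst).Nodup := by
  unfold selectedSets
  split_ifs <;> simp

-- the core equality, for any selected sets list with distinct names
theorem product_eq_frontier (sets : List (String × Int))
    (hnd : (sets.map Prod.fst).Nodup) :
    (if sets = [] then [(("none" : String), ([] : List (String × Int)))]
     else (pyProduct (sets.map Prod.snd)).map (fun combo =>
       let zipped := sets.zip combo
       let indices := (zipped.foldl (fun d p => d.insert p.1.1 p.2) PySem.Dict.empty).items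
       let label := PySem.Str.join "_" (zipped.map (fun p => p.1.1 ++ PySem.Int.toStr p.2))
       (label, indices)))
    = (if sets = [] then [(("none" : String), ([] : List (String × Int)))]
       else (sets.foldl frontierStep [([], [])]).map
              (fun pr => (PySem.Str.join "_" pr.1, pr.2))) := by
  by_cases h : sets = []
  · simp [h]
  · simp only [h, if_false]
    rw [foldl_frontierStep]
    simp only [List.flatMap_cons, List.flatMap_nil, List.append_nil, List.map_map]
    apply List.map_congr_left
    intro combo hcombo
    have hlen : combo.length = sets.length := by
      simpa using length_of_mem_pyProduct hcombo
    have hmapfst : (sets.zip combo).map (fun p => p.1.1) = sets.map Prod.fst := by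
      have h2 : (sets.zip combo).map (fun p => p.1.1)
          = ((sets.zip combo).map Prod.fst).map Prod.fst := by
        simp [List.map_map, Function.comp]
      rw [h2, List.map_fst_zip (le_of_eq hlen.symm)]
    have hitems := PySem.Dict.items_foldl_insert_fresh
      (l := sets.zip combo) (k := fun p => p.1.1) (v := fun p => p.2)
      (d := PySem.Dict.empty)
      (by intro a _; simp)
      (by rw [hmapfst]; exact hnd)
    simp only [Function.comp, hitems]
    simp [PySem.Dict.empty]

theorem enumerate_permutations_spec : Claim_equal_enumerate_permutations := by
  intro scenario variant _
  exact product_eq_frontier (selectedSets scenario variant)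
    (nodup_selectedSets scenario variant)
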